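-- pv_equiv track=rewrite | github.com/MohamedA95/AOHW25_795 | streamlit_app/utils.py | compute_unet_flops
-- ===== SOURCE A (Python) =====
-- def compute_unet_flops(num_levels, base_filters, input_size, input_channels=3):
--     """
--     Computes approximate FLOPs for a U-Net.
--
--     Args:
--         num_levels (int)
--         base_filters (int)
--         input_size (int or tuple): input image size (H=W assumed square)
--         input_channels (int)
--
--     Returns:
--         total_flops (int)
--     """
--     if isinstance(input_size, int):
--         H = W = input_size
--     else:
--         H, W = input_size
--
--     total_flops = 0
--     in_ch = input_channels
--     h, w = H, W
--
--     # Encoder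
--     for level in range(num_levels):
--         out_ch = base_filters * (2 ** level)
--         # Conv1
--         total_flops += 2 * in_ch * 3 * 3 * h * w * out_ch
--         # Conv2
--         total_flops += 2 * out_ch * 3 * 3 * h * w * out_ch
--         in_ch = out_ch
--         h //= 2  # After pooling
--         w //= 2
--
--     # Bottleneck
--     out_ch = base_filters * (2 ** num_levels)
--     total_flops += 2 * in_ch * 3 * 3 * h * w * out_ch
--     total_flops += 2 * out_ch * 3 * 3 * h * w * out_ch
--     in_ch = out_ch
--
--     # Decoder
--     for level in reversed(range(num_levels)):
--         out_ch = base_filters * (2 ** level)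
--         h *= 2  # After upsample
--         w *= 2
--         total_flops += 2 * in_ch * 3 * 3 * h * w * out_ch
--         total_flops += 2 * out_ch * 3 * 3 * h * w * out_ch
--         in_ch = out_ch
--
--     return total_flops
-- ===== SOURCE B (Python) =====
-- def compute_unet_flops(num_levels, base_filters, input_size, input_channels=3):
--     """One encoder pass with merged conv terms; the whole decoder pass is a closed form.
--
--     Each pair of convs costs 18*h*w*out_ch*(in_ch + out_ch).  In the decoder,
--     level l runs at size (h_n*2^(n-l), w_n*2^(n-l)) with in=bf*2^(l+1), out=bf*2^l,
--     so its term is 54*bf^2*4^n*h_n*w_n independent of l: the decoder loop sums to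
--     54*num_levels*bf^2*4^num_levels*h_n*w_n.
--     """
--     if isinstance(input_size, int):
--         H = W = input_size
--     else:
--         H, W = input_size
--
--     flops = 0
--     in_ch = input_channels
--     h, w = H, W
--     for level in range(num_levels):
--         out_ch = base_filters * (2 ** level)
--         flops += 18 * h * w * out_ch * (in_ch + out_ch)
--         in_ch = out_ch
--         h //= 2
--         w //= 2
--
--     # bottleneck
--     out_ch = base_filters * (2 ** num_levels)
--     flops += 18 * h * w * out_ch * (in_ch + out_ch)
--
--     # decoder, in closed form
--     flops += 54 * num_levels * base_filters ** 2 * 4 ** num_levels * h * w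
--     return flops
-- ===== Notes on version B (the rewrite author's own statement) =====
-- stated objective: alternative
-- what changed: B keeps one encoder pass with the two convs merged into 18*h*w*out*(in+out) and replaces A's entire reversed decoder loop by the closed-form sum 54*num_levels*bf^2*4^num_levels*h_n*w_n.
-- outside the precondition, e.g. on compute_unet_flops(-1, 4, 8, 3): A returns 11520.0, B returns -2304.0
import Mathlib
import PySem

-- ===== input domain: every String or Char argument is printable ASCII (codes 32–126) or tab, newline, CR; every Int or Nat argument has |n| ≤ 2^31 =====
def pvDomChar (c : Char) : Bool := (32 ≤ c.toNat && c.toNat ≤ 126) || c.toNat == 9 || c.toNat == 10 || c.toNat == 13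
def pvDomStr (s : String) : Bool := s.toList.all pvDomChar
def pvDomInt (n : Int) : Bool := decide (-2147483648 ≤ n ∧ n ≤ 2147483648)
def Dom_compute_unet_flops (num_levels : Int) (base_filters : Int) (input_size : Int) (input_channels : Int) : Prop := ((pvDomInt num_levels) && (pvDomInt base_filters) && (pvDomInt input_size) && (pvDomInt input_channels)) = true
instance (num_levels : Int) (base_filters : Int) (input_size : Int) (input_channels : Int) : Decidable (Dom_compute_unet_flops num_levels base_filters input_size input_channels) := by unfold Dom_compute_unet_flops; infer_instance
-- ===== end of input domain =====

-- B merges each level's two convs into one term and replaces A's whole reversed decoder loop by a closed-form sum.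


-- ===== PORT A =====
-- literal port of A: encoder foldl over range(num_levels), bottleneck, decoder foldl over reversed(range(num_levels));
-- inside the loops 'level' is ≥ 0, so 2 ** level is ported as 2 ^ level.toNat (exact there, and at the bottleneck under Pre_)
def compute_unet_flops (num_levels : Int) (base_filters : Int) (input_size : Int) (input_channels : Int) : Int :=
  let H := input_size
  let W := input_size
  let s := (PySem.List.pyRange 0 num_levels 1).foldl
    (fun (st : Int × Int × Int × Int) (level : Int) =>
      let out_ch := base_filters * 2 ^ level.toNat
      let tot := st.1 + 2 * st.2.1 * 3 * 3 * st.2.2.1 * st.2.2.2 * out_ch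
      let tot := tot + 2 * out_ch * 3 * 3 * st.2.2.1 * st.2.2.2 * out_ch
      (tot, out_ch, PySem.Int.floordiv st.2.2.1 2, PySem.Int.floordiv st.2.2.2 2))
    (0, input_channels, H, W)
  let out_ch := base_filters * 2 ^ num_levels.toNat
  let tot := s.1 + 2 * s.2.1 * 3 * 3 * s.2.2.1 * s.2.2.2 * out_ch
  let tot := tot + 2 * out_ch * 3 * 3 * s.2.2.1 * s.2.2.2 * out_ch
  let s2 := ((PySem.List.pyRange 0 num_levels 1).reverse).foldl
    (fun (st : Int × Int × Int × Int) (level : Int) =>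
      let out_ch := base_filters * 2 ^ level.toNat
      let h := st.2.2.1 * 2
      let w := st.2.2.2 * 2
      let tot := st.1 + 2 * st.2.1 * 3 * 3 * h * w * out_ch
      let tot := tot + 2 * out_ch * 3 * 3 * h * w * out_ch
      (tot, out_ch, h, w))
    (tot, out_ch, s.2.2.1, s.2.2.2)
  s2.1

-- ===== PORT B =====
-- port of Source B: one encoder fold with the merged term 18*h*w*out*(in+out), then the bottleneck,
-- then the decoder as the closed-form term 54*num_levels*bf^2*4^num_levels*h*w (no second loop)
def compute_unet_flops_alt (num_levels : Int) (base_filters : Int) (input_size : Int) (input_channels : Int) : Int :=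
  let H := input_size
  let W := input_size
  let s := (PySem.List.pyRange 0 num_levels 1).foldl
    (fun (st : Int × Int × Int × Int) (level : Int) =>
      let out_ch := base_filters * 2 ^ level.toNat
      (st.1 + 18 * st.2.2.1 * st.2.2.2 * out_ch * (st.2.1 + out_ch),
       out_ch, PySem.Int.floordiv st.2.2.1 2, PySem.Int.floordiv st.2.2.2 2))
    (0, input_channels, H, W)
  let out_ch := base_filters * 2 ^ num_levels.toNat
  let flops := s.1 + 18 * s.2.2.1 * s.2.2.2 * out_ch * (s.2.1 + out_ch)
  flops + 54 * num_levels * base_filters ^ 2 * 4 ^ num_levels.toNat * s.2.2.1 * s.2.2.2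

-- ===== PRECONDITION & SPEC =====
-- Pre_ excludes num_levels < 0, where A returns a float (2 ** negative_int is a float), not an int of the declared type.
def Pre_compute_unet_flops (num_levels : Int) (base_filters : Int) (input_size : Int) (input_channels : Int) : Prop := 0 ≤ num_levels
instance (num_levels : Int) (base_filters : Int) (input_size : Int) (input_channels : Int) : Decidable (Pre_compute_unet_flops num_levels base_filters input_size input_channels) := by unfold Pre_compute_unet_flops; infer_instance
def pvWitness_compute_unet_flops : Int × Int × Int × Int := (2, 4, 16, 3)

def Spec_compute_unet_flops (num_levels : Int) (base_filters : Int) (input_size : Int) (input_channels : Int) (out : Int) : Prop := out = compute_unet_flops_alt num_levels base_filters input_size input_channels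
instance (num_levels : Int) (base_filters : Int) (input_size : Int) (input_channels : Int) (out : Int) : Decidable (Spec_compute_unet_flops num_levels base_filters input_size input_channels out) := by unfold Spec_compute_unet_flops; infer_instance

-- ===== CLAIM (what is proved, stated in full; the proofs are below) =====
def Claim_equal_compute_unet_flops : Prop := ∀ (num_levels : Int) (base_filters : Int) (input_size : Int) (input_channels : Int), Dom_compute_unet_flops num_levels base_filters input_size input_channels → Pre_compute_unet_flops num_levels base_filters input_size input_channels → Spec_compute_unet_flops num_levels base_filters input_size input_channels (compute_unet_flops num_levels base_filters input_size input_channels)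

-- ===== LEMMAS AND PROOFS =====

-- the loop bodies over Nat levels (what the pyRange folds become once 0 ≤ num_levels)
def encStepA (bf : Int) (st : Int × Int × Int × Int) (k : Nat) : Int × Int × Int × Int :=
  (st.1 + 2 * st.2.1 * 3 * 3 * st.2.2.1 * st.2.2.2 * (bf * 2 ^ k)
        + 2 * (bf * 2 ^ k) * 3 * 3 * st.2.2.1 * st.2.2.2 * (bf * 2 ^ k),
   bf * 2 ^ k, PySem.Int.floordiv st.2.2.1 2, PySem.Int.floordiv st.2.2.2 2)

def encStepB (bf : Int) (st : Int × Int × Int × Int) (k : Nat) : Int × Int × Int × Int :=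
  (st.1 + 18 * st.2.2.1 * st.2.2.2 * (bf * 2 ^ k) * (st.2.1 + bf * 2 ^ k),
   bf * 2 ^ k, PySem.Int.floordiv st.2.2.1 2, PySem.Int.floordiv st.2.2.2 2)

def decStep (bf : Int) (st : Int × Int × Int × Int) (k : Nat) : Int × Int × Int × Int :=
  (st.1 + 2 * st.2.1 * 3 * 3 * (st.2.2.1 * 2) * (st.2.2.2 * 2) * (bf * 2 ^ k)
        + 2 * (bf * 2 ^ k) * 3 * 3 * (st.2.2.1 * 2) * (st.2.2.2 * 2) * (bf * 2 ^ k),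
   bf * 2 ^ k, st.2.2.1 * 2, st.2.2.2 * 2)

lemma encStepA_eq_B (bf : Int) : encStepA bf = encStepB bf := by
  funext st k
  simp only [encStepA, encStepB]
  ring_nf

-- A's decoder loop, started at the bottleneck state, sums to the closed form
lemma dec_closed (n : Nat) : ∀ (bf tot h w : Int),
    ((List.range n).reverse.foldl (decStep bf) (tot, bf * 2 ^ n, h, w)).1 =
      tot + 54 * (n : Int) * bf ^ 2 * 4 ^ n * h * w := by
  induction n with
  | zero => intro bf tot h w; simp
  | succ n ih =>
    intro bf tot h w
    rw [List.range_succ, List.reverse_append, List.reverse_singleton, List.singleton_append,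
      List.foldl_cons]
    have hstep : decStep bf (tot, bf * 2 ^ (n + 1), h, w) n =
        (tot + 2 * (bf * 2 ^ (n + 1)) * 3 * 3 * (h * 2) * (w * 2) * (bf * 2 ^ n)
             + 2 * (bf * 2 ^ n) * 3 * 3 * (h * 2) * (w * 2) * (bf * 2 ^ n),
         bf * 2 ^ n, h * 2, w * 2) := rfl
    rw [hstep, ih]
    simp only [pow_succ]
    have h4 : ((4 : Int)) ^ n = 2 ^ n * 2 ^ n := by
      rw [show (4 : Int) = 2 * 2 by norm_num, mul_pow]
    rw [h4]
    push_cast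
    ring

-- ===== VERDICT (by name: the statement is the Claim_ definition above) =====
theorem compute_unet_flops_spec : Claim_equal_compute_unet_flops := by
  intro nl bf sz ch _ hpre
  unfold Spec_compute_unet_flops compute_unet_flops compute_unet_flops_alt
  obtain ⟨n, rfl⟩ : ∃ n : Nat, nl = (n : Int) := ⟨nl.toNat, (Int.toNat_of_nonneg hpre).symm⟩
  rw [PySem.List.pyRange_zero_natCast]
  simp only [List.foldl_map, ← List.map_reverse, Int.toNat_natCast]
  have eA : (fun (x : Int × Int × Int × Int) (y : Nat) =>
      (x.1 + 2 * x.2.1 * 3 * 3 * x.2.2.1 * x.2.2.2 * (bf * 2 ^ y) +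
         2 * (bf * 2 ^ y) * 3 * 3 * x.2.2.1 * x.2.2.2 * (bf * 2 ^ y),
       bf * 2 ^ y, PySem.Int.floordiv x.2.2.1 2, PySem.Int.floordiv x.2.2.2 2)) = encStepA bf := rfl
  have eB : (fun (x : Int × Int × Int × Int) (y : Nat) =>
      (x.1 + 18 * x.2.2.1 * x.2.2.2 * (bf * 2 ^ y) * (x.2.1 + bf * 2 ^ y),
       bf * 2 ^ y, PySem.Int.floordiv x.2.2.1 2, PySem.Int.floordiv x.2.2.2 2)) = encStepB bf := rfl
  have eD : (fun (x : Int × Int × Int × Int) (y : Nat) =>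
      (x.1 + 2 * x.2.1 * 3 * 3 * (x.2.2.1 * 2) * (x.2.2.2 * 2) * (bf * 2 ^ y) +
         2 * (bf * 2 ^ y) * 3 * 3 * (x.2.2.1 * 2) * (x.2.2.2 * 2) * (bf * 2 ^ y),
       bf * 2 ^ y, x.2.2.1 * 2, x.2.2.2 * 2)) = decStep bf := rfl
  rw [eA, eB, eD, encStepA_eq_B]
  obtain ⟨t, c, h, w⟩ := (List.range n).foldl (encStepB bf) (0, ch, sz, sz)
  rw [show (t + 2 * c * 3 * 3 * h * w * (bf * 2 ^ n) + 2 * (bf * 2 ^ n) * 3 * 3 * h * w * (bf * 2 ^ n),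
        bf * 2 ^ n, h, w) =
      ((t + 2 * c * 3 * 3 * h * w * (bf * 2 ^ n) + 2 * (bf * 2 ^ n) * 3 * 3 * h * w * (bf * 2 ^ n) : Int),
        bf * 2 ^ n, h, w) from rfl]
  rw [dec_closed n bf _ h w]
  ring
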